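-- pv_equiv track=rewrite | github.com/yaranasserr/aws | OA leetcodediscuss/countpasswords.py | countDistinctPasswords
-- ===== SOURCE A (Python) =====
-- def countDistinctPasswords(password: str) -> int:
--     from collections import Counter
--
--     n = len(password)
--     total_pairs = n * (n - 1) // 2
--
--     # Count characters
--     freq = Counter(password)
--
--     # Count number of same character pairs
--     same_pairs = sum(f * (f - 1) // 2 for f in freq.values())
--
--     # Distinct reversals = total pairs with different characters
--     distinct_reversals = total_pairs - same_pairs
--
--     # Add the original string
--     return 1 + distinct_reversals
-- ===== SOURCE B (Python) =====
-- def countDistinctPasswords(password: str) -> int: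
--     from collections import Counter
--     freq = Counter(password)
--     seen = 0
--     result = 0
--     for f in freq.values():
--         result += f * seen
--         seen += f
--     return 1 + result
-- ===== Notes on version B (the rewrite author's own statement) =====
-- stated objective: alternative
-- what changed: Instead of computing total pairs n(n-1)//2 and subtracting same-character pairs, B accumulates the cross-character pair count directly in one pass over the frequencies with a running prefix sum (result += f*seen; seen += f), never forming either closed-form sum.
import Mathlib
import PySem

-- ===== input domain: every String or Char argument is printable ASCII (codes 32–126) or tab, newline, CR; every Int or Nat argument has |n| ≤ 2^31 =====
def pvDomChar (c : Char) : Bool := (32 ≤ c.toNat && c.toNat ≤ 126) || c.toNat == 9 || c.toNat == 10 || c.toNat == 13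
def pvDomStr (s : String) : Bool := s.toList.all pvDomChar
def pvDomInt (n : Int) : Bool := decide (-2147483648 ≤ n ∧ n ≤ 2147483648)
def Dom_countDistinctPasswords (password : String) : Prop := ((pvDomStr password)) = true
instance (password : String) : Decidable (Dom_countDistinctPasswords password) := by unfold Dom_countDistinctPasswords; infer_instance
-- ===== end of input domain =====

-- B replaces A's "total pairs minus same-character pairs" closed-form subtraction by a single
-- accumulating pass over the frequency values (result += f*seen; seen += f); alternative, same cost.

-- ===== PORT A =====
def countDistinctPasswords (password : String) : Int :=
  let n : Int := (password.toList.length : Int)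
  let totalPairs := PySem.Int.floordiv (n * (n - 1)) 2
  let freq := PySem.Dict.counter password.toList
  let samePairs := (freq.values.map (fun f => PySem.Int.floordiv (f * (f - 1)) 2)).sum
  let distinctReversals := totalPairs - samePairs
  1 + distinctReversals

-- ===== PORT B =====
def countDistinctPasswords_alt (password : String) : Int :=
  let freq := PySem.Dict.counter password.toList
  let sr := freq.values.foldl (fun (sr : Int × Int) f => (sr.1 + f, sr.2 + f * sr.1)) (0, 0)
  1 + sr.2

-- ===== PRECONDITION & SPEC =====
def Spec_countDistinctPasswords (password : String) (out : Int) : Prop := out = countDistinctPasswords_alt password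
instance (password : String) (out : Int) : Decidable (Spec_countDistinctPasswords password out) := by unfold Spec_countDistinctPasswords; infer_instance

-- ===== CLAIM (what is proved, stated in full; the proofs are below) =====
def Claim_equal_countDistinctPasswords : Prop := ∀ (password : String), Dom_countDistinctPasswords password → Spec_countDistinctPasswords password (countDistinctPasswords password)

-- ===== LEMMAS AND PROOFS =====

-- cross-pair sum: P (f :: t) = f * t.sum + P t
def pvCross : List Int → Int
  | [] => 0
  | f :: t => f * t.sum + pvCross t

theorem pvFoldl_char (vs : List Int) (s r : Int) :
    vs.foldl (fun (sr : Int × Int) f => (sr.1 + f, sr.2 + f * sr.1)) (s, r)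
      = (s + vs.sum, r + s * vs.sum + pvCross vs) := by
  induction vs generalizing s r with
  | nil => simp [pvCross]
  | cons f t ih => simp [List.foldl_cons, ih, pvCross]; constructor <;> ring

theorem pvCross_double (vs : List Int) :
    2 * pvCross vs = vs.sum * vs.sum - (vs.map (fun f => f * f)).sum := by
  induction vs with
  | nil => simp [pvCross]
  | cons f t ih => simp [pvCross, List.sum_cons]; ring_nf; ring_nf at ih; omega

theorem pvHalf_exact (a : Int) : 2 * PySem.Int.floordiv (a * (a - 1)) 2 = a * (a - 1) := by
  rw [PySem.Int.floordiv_eq_ediv_of_pos (by norm_num)]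
  have h : (a * (a - 1)) % 2 = 0 := by
    rcases Int.even_or_odd a with ⟨k, hk⟩ | ⟨k, hk⟩ <;> subst hk <;> ring_nf <;> omega
  omega

theorem pvSame_double (vs : List Int) :
    2 * (vs.map (fun f => PySem.Int.floordiv (f * (f - 1)) 2)).sum
      = (vs.map (fun f => f * (f - 1))).sum := by
  induction vs with
  | nil => simp
  | cons f t ih =>
    simp only [List.map_cons, List.sum_cons, mul_add, ih, pvHalf_exact]

theorem pvSum_values_counter (xs : List Char) :
    (PySem.Dict.counter xs).values.sum = (xs.length : Int) := by
  have hv : (PySem.Dict.counter xs).values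
      = (PySem.Set.ofList xs).map (fun k => (xs.count k : Int)) := by
    show (PySem.Dict.counter xs).items.map (·.2) = _
    rw [PySem.Dict.items_counter, List.map_map]
    rfl
  have hperm : (PySem.Set.ofList xs : List Char).Perm xs.dedup := by
    refine (List.perm_ext_iff_of_nodup (PySem.Set.nodup_ofList xs) xs.nodup_dedup).mpr ?_
    intro a
    rw [PySem.Set.mem_ofList, List.mem_dedup]
  have := (hperm.map (fun k => (xs.count k : Int))).sum_eq
  rw [hv, this]
  have hnat := congrArg (fun n : Nat => (n : Int)) (List.sum_map_count_dedup_eq_length xs)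
  push_cast at hnat
  simpa using hnat

-- ===== VERDICT (by name: the statement is the Claim_ definition above) =====
theorem countDistinctPasswords_spec : Claim_equal_countDistinctPasswords := by
  intro password _
  unfold Spec_countDistinctPasswords countDistinctPasswords countDistinctPasswords_alt
  set xs := password.toList with hxs
  set vs := (PySem.Dict.counter xs).values with hvs
  simp only []
  rw [pvFoldl_char]
  have hsum : vs.sum = (xs.length : Int) := pvSum_values_counter xs
  have h1 : 2 * PySem.Int.floordiv ((xs.length : Int) * ((xs.length : Int) - 1)) 2
      = (xs.length : Int) * ((xs.length : Int) - 1) := pvHalf_exact _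
  have h2 := pvSame_double vs
  have h3 := pvCross_double vs
  have h4 : (vs.map (fun f => f * (f - 1))).sum
      = (vs.map (fun f => f * f)).sum - vs.sum := by
    induction vs with
    | nil => simp
    | cons f t ih => simp only [List.map_cons, List.sum_cons, ih]; ring
  rw [hsum] at h3
  rw [hsum] at h4
  have h5 : (xs.length : Int) * ((xs.length : Int) - 1)
      = (xs.length : Int) * (xs.length : Int) - (xs.length : Int) := by ring
  simp only [← hvs]
  omega
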